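-- pv_equiv track=rewrite | github.com/LawlietJH/CChain | CChain.py | Asc_Hex
-- ===== SOURCE A (Python) =====
-- def Asc_Hex(Ascii):	#~ Ascii a Hexadecimal.
--
-- 	cont = 0
-- 	Hexadecimal = ""
--
-- 	Hex = ''.join((hex(ord(c))[2:] for c in Ascii))
--
-- 	#~ Se Separa la Cadena con un Espacio en Cada Byte.
-- 	for x in Hex:
--
-- 		cont += 1
--
-- 		if cont % 2 != 0:
-- 			Hexadecimal += x
--
-- 		else:
-- 			Hexadecimal += x + " "
--
-- 	Hexadecimal = Hexadecimal.upper()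
--
-- 	return Hexadecimal
-- ===== SOURCE B (Python) =====
-- def Asc_Hex(Ascii):
--     # Build the full concatenated (unpadded) hex string once, then walk it in
--     # steps of two: a full two-char chunk gets a trailing space, a lone
--     # leftover char does not.  Upper-case once at the end.
--     s = ''.join(hex(ord(c))[2:] for c in Ascii)
--     out = []
--     for i in range(0, len(s), 2):
--         chunk = s[i:i+2]
--         out.append(chunk + " " if len(chunk) == 2 else chunk)
--     return ''.join(out).upper()
-- ===== Notes on version B (the rewrite author's own statement) =====
-- stated objective: alternative
-- what changed: Replaces the per-character parity counter (cont % 2 deciding when to emit a space) with a step-2 index loop that slices two-character chunks out of the concatenated hex string and appends a space exactly for full chunks, joining once at the end instead of repeated string concatenation.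
import Mathlib
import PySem

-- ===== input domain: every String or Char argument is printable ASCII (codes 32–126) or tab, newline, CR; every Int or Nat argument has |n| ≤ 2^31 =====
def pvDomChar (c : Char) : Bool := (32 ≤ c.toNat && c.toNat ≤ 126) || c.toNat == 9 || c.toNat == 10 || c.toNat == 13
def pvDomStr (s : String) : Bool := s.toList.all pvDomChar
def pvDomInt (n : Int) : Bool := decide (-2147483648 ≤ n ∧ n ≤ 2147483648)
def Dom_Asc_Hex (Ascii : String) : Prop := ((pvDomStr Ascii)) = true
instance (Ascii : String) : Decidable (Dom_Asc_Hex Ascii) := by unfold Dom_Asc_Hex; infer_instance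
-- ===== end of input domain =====

-- B replaces A's per-character parity counter by a step-2 chunking loop over the joined
-- hex string (alternative decomposition, same cost).

-- hex(n)[2:] for a Nat n (lowercase, no zero padding) — shared by both ports, since both
-- Pythons contain the identical ''.join(hex(ord(c))[2:] for c in Ascii).
def hexDigitChar (n : Nat) : Char := if n < 10 then Char.ofNat (48 + n) else Char.ofNat (87 + n)

def pyHexAux (n : Nat) (acc : List Char) : List Char :=
  if n = 0 then acc else pyHexAux (n / 16) (hexDigitChar (n % 16) :: acc)
termination_by n
decreasing_by exact Nat.div_lt_self (Nat.pos_of_ne_zero (by assumption)) (by norm_num)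

def pyHex (n : Nat) : List Char := if n = 0 then ['0'] else pyHexAux n []

-- ===== PORT A =====
def Asc_Hex (Ascii : String) : String :=
  let Hex : List Char := Ascii.toList.flatMap (fun c => pyHex c.toNat)
  let st := Hex.foldl (fun (st : Int × List Char) x =>
      let cont := st.1 + 1
      if PySem.Int.mod cont 2 ≠ 0 then (cont, st.2 ++ [x])
      else (cont, st.2 ++ [x, ' '])) ((0 : Int), ([] : List Char))
  PySem.Str.upper (String.ofList st.2)

-- ===== PORT B =====
def Asc_Hex_alt (Ascii : String) : String :=
  let s : List Char := Ascii.toList.flatMap (fun c => pyHex c.toNat)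
  let out : List (List Char) := (PySem.List.pyRange 0 (s.length : Int) 2).foldl
      (fun out i =>
        let chunk := PySem.List.slice s (some i) (some (i + 2))
        out ++ [if chunk.length = 2 then chunk ++ [' '] else chunk]) []
  PySem.Str.upper (String.ofList (PySem.Chars.join [] out))

-- ===== PRECONDITION & SPEC =====
def Spec_Asc_Hex (Ascii : String) (out : String) : Prop := out = Asc_Hex_alt Ascii
instance (Ascii : String) (out : String) : Decidable (Spec_Asc_Hex Ascii out) := by unfold Spec_Asc_Hex; infer_instance

-- ===== CLAIM (what is proved, stated in full; the proofs are below) =====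
def Claim_equal_Asc_Hex : Prop := ∀ (Ascii : String), Dom_Asc_Hex Ascii → Spec_Asc_Hex Ascii (Asc_Hex Ascii)

-- ===== LEMMAS AND PROOFS =====

-- the common value both loops compute: pairs of chars, each full pair followed by a space
def chunkSp : List Char → List Char
  | a :: b :: t => a :: b :: ' ' :: chunkSp t
  | [a] => [a]
  | [] => []

def chunkPieces : List Char → List (List Char)
  | a :: b :: t => [a, b, ' '] :: chunkPieces t
  | [a] => [[a]]
  | [] => []

-- named forms of the two loop bodies (definitionally equal to the lambdas in the ports)
def aStep (st : Int × List Char) (x : Char) : Int × List Char :=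
  let cont := st.1 + 1
  if PySem.Int.mod cont 2 ≠ 0 then (cont, st.2 ++ [x]) else (cont, st.2 ++ [x, ' '])

def bStep (s : List Char) (out : List (List Char)) (i : Int) : List (List Char) :=
  let chunk := PySem.List.slice s (some i) (some (i + 2))
  out ++ [if chunk.length = 2 then chunk ++ [' '] else chunk]

lemma aLoop_eq (l : List Char) : ∀ (cont : Int) (acc : List Char),
    PySem.Int.mod cont 2 = 0 →
    (l.foldl aStep (cont, acc)).2 = acc ++ chunkSp l := by
  induction l using chunkSp.induct with
  | case1 a b t ih =>
    intro cont acc h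
    rw [PySem.Int.mod_eq_emod_of_pos (by norm_num)] at h
    have h2 : PySem.Int.mod (cont + 1 + 1) 2 = 0 := by
      rw [PySem.Int.mod_eq_emod_of_pos (by norm_num)]; omega
    have e1 : aStep (cont, acc) a = (cont + 1, acc ++ [a]) := by
      simp [aStep]
      omega
    have e2 : aStep (cont + 1, acc ++ [a]) b = (cont + 1 + 1, acc ++ [a] ++ [b, ' ']) := by
      simp [aStep]
      omega
    rw [List.foldl_cons, List.foldl_cons, e1, e2, ih _ _ h2]
    simp [chunkSp]
  | case2 a =>
    intro cont acc h
    rw [PySem.Int.mod_eq_emod_of_pos (by norm_num)] at h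
    have e1 : aStep (cont, acc) a = (cont + 1, acc ++ [a]) := by
      simp [aStep]
      omega
    rw [List.foldl_cons, e1, List.foldl_nil]
    simp [chunkSp]
  | case3 => intro cont acc _; simp [chunkSp]

lemma range2 (n : Nat) :
    PySem.List.pyRange 0 (n : Int) 2 = (List.range ((n + 1) / 2)).map (fun (k : Nat) => (2 * (k : Int))) := by
  rw [PySem.List.pyRange_of_pos _ _ (by norm_num)]
  have h : (if (0 : Int) < n then (((n : Int) - 0 + 2 - 1) / 2).toNat else 0) = (n + 1) / 2 := by
    split_ifs with h <;> omega
  rw [h]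
  simp only [zero_add]

lemma slice_two_front (l : List Char) :
    PySem.List.slice l (some (2 * (((0 : Nat)) : Int))) (some (2 * (((0 : Nat)) : Int) + 2)) =
    l.take 2 := by
  have h2 : (2 * (((0 : Nat)) : Int) + 2) = (((0 : Nat)) : Int) + ((2 : Nat) : Int) := by norm_num
  have h0 : (2 * (((0 : Nat)) : Int)) = (((0 : Nat)) : Int) := by norm_num
  rw [h2, h0, PySem.List.slice_natCast_add]
  simp

lemma slice_cons_cons_shift (a b : Char) (t : List Char) (i : Int) (h : 0 ≤ i) :
    PySem.List.slice (a :: b :: t) (some (i + 2)) (some (i + 2 + 2)) =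
    PySem.List.slice t (some i) (some (i + 2)) := by
  obtain ⟨j, rfl⟩ := Int.eq_ofNat_of_zero_le h
  have L : PySem.List.slice (a :: b :: t) (some ((j : Int) + 2)) (some ((j : Int) + 2 + 2)) =
      List.take 2 (List.drop (j + 2) (a :: b :: t)) := by
    have e2 : ((j : Int) + 2 + 2) = (((j + 2 : Nat)) : Int) + ((2 : Nat) : Int) := by push_cast; ring
    have ej : ((j : Int) + 2) = (((j + 2 : Nat)) : Int) := by push_cast; ring
    rw [e2, ej, PySem.List.slice_natCast_add]
  have R : PySem.List.slice t (some ((j : Int))) (some ((j : Int) + 2)) =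
      List.take 2 (List.drop j t) := by
    have e3 : ((j : Int) + 2) = ((j : Int)) + ((2 : Nat) : Int) := by push_cast; ring
    rw [e3, PySem.List.slice_natCast_add]
  rw [L, R]
  simp [List.drop]

lemma bStep_shift (a b : Char) (t : List Char) (out : List (List Char)) (i : Int) (h : 0 ≤ i) :
    bStep (a :: b :: t) out (i + 2) = bStep t out i := by
  unfold bStep
  rw [slice_cons_cons_shift a b t i h]

lemma bLoop_eq (l : List Char) : ∀ (acc : List (List Char)),
    ((List.range ((l.length + 1) / 2)).foldl
      (fun out (k : Nat) => bStep l out (2 * (k : Int))) acc)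
    = acc ++ chunkPieces l := by
  induction l using chunkPieces.induct with
  | case1 a b t ih =>
    intro acc
    have hlen : ((a :: b :: t).length + 1) / 2 = (t.length + 1) / 2 + 1 := by
      simp only [List.length_cons]; omega
    have e1 : bStep (a :: b :: t) acc (2 * (((0 : Nat)) : Int)) = acc ++ [[a, b, ' ']] := by
      unfold bStep
      rw [slice_two_front]
      simp
    rw [hlen, List.range_succ_eq_map]
    simp only [List.foldl_cons, List.foldl_map]
    rw [e1]
    rw [PySem.List.foldl_congr_mem _ _ (fun out (k : Nat) => bStep t out (2 * (k : Int))) _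
      (by
        intro out k _
        simp only []
        have e : (2 * ((Nat.succ k : Nat) : Int)) = 2 * (k : Int) + 2 := by
          push_cast [Nat.succ_eq_add_one]; ring
        rw [e, bStep_shift a b t out (2 * (k : Int)) (by positivity)])]
    rw [ih]
    simp [chunkPieces]
  | case2 a =>
    intro acc
    have e1 : bStep [a] acc (2 * (((0 : Nat)) : Int)) = acc ++ [[a]] := by
      unfold bStep
      rw [slice_two_front]
      simp
    simp only [List.length_singleton]
    simp only [show ((1 + 1) / 2 : Nat) = 1 from rfl, List.range_one, List.foldl_cons, List.foldl_nil]
    rw [e1]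
    simp [chunkPieces]
  | case3 => intro acc; simp [chunkPieces]

lemma join_cons_eq (x : List Char) (rest : List (List Char)) :
    PySem.Chars.join [] (x :: rest) = x ++ PySem.Chars.join [] rest := by
  cases rest with
  | nil => simp [PySem.Chars.join_singleton]
  | cons y r => rw [PySem.Chars.join_cons_cons]; simp

lemma join_chunkPieces (l : List Char) :
    PySem.Chars.join [] (chunkPieces l) = chunkSp l := by
  induction l using chunkPieces.induct with
  | case1 a b t ih =>
    rw [show chunkPieces (a :: b :: t) = [a, b, ' '] :: chunkPieces t from rfl,
        join_cons_eq, ih,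
        show chunkSp (a :: b :: t) = a :: b :: ' ' :: chunkSp t from rfl]
    rfl
  | case2 a => simp [chunkPieces, chunkSp, PySem.Chars.join_singleton]
  | case3 => rfl

-- ===== VERDICT (by name: the statement is the Claim_ definition above) =====

-- ===== VERDICT (by name: the statement is the Claim_ definition above) =====
theorem Asc_Hex_spec : Claim_equal_Asc_Hex := by
  intro Ascii _
  unfold Spec_Asc_Hex
  have key : ∀ l : List Char,
      (l.foldl aStep ((0 : Int), ([] : List Char))).2 =
      PySem.Chars.join [] ((PySem.List.pyRange 0 ((l.length : Nat) : Int) 2).foldl (bStep l) []) := by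
    intro l
    rw [aLoop_eq l 0 [] (by decide), range2]
    simp only [List.foldl_map]
    rw [bLoop_eq]
    simp [join_chunkPieces]
  have hA : Asc_Hex Ascii = PySem.Str.upper (String.ofList
      ((Ascii.toList.flatMap (fun c => pyHex c.toNat)).foldl aStep ((0 : Int), ([] : List Char))).2) := rfl
  have hB : Asc_Hex_alt Ascii = PySem.Str.upper (String.ofList (PySem.Chars.join []
      ((PySem.List.pyRange 0 (((Ascii.toList.flatMap (fun c => pyHex c.toNat)).length : Nat) : Int) 2).foldl
        (bStep (Ascii.toList.flatMap (fun c => pyHex c.toNat))) []))) := rfl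
  rw [hA, hB, key]
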